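-- pv_equiv track=rewrite | github.com/julianbrandt/Hydrobot | NP_functions.py | input_auth
-- ===== SOURCE A (Python) =====
-- def input_auth(string):
--     accepted_list = ['x', 'e', 'pi', 'PI', 'sqrt', 'cos', 'sin', 'tan', 'arccos', 'arcsin', 'arctan']
--     characters = ['a', 'b', 'b', 'c', 'd', 'e', 'f', 'g', 'h', 'i', 'j', 'k', 'l', 'm', 'n', 'o', 'p', 'q', 'r', 's', 't', 'u', 'v', 'w', 'x', 'y', 'z', 'A', 'B', 'C', 'D', 'E', 'F', 'G', 'H', 'I', 'J', 'K', 'L', 'M', 'N', 'O', 'P', 'Q', 'R', 'S', 'T', 'U', 'V', 'W', 'X', 'Y', 'Z', '_', '#', '&']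
--     for i in range(0, len(string)):
--         checkword = ""
--         if string[i] in characters:
--             checkword += string[i]
--             for j in range(1, 6, 1):
--                 try:
--                     if j <= len(string)-i:
--                         if string[i+j] in characters:
--                             checkword += string[i+j]
--                         else:
--                             break
--                 except:
--                     break
--             for j in range(1, 6, 1):
--                 try:
--                     if j <= i:
--                         if string[i-j] in characters:
--                             checkword = string[i-j] + checkword
--                         else:
--                             break
--                     else:
--                         break
--                 except:
--                     break
--
--         if checkword not in accepted_list and checkword != "":
--             return False
--     return True
-- ===== SOURCE B (Python) =====
-- def input_auth(string):
--     accepted = {'x', 'e', 'pi', 'PI', 'sqrt', 'cos', 'sin', 'tan', 'arccos', 'arcsin', 'arctan'}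
--     allowed = set('abcdefghijklmnopqrstuvwxyzABCDEFGHIJKLMNOPQRSTUVWXYZ_#&')
--     token = ''
--     for ch in string:
--         if ch in allowed:
--             token += ch
--         else:
--             if token and token not in accepted:
--                 return False
--             token = ''
--     return (not token) or token in accepted
-- ===== Notes on version B (the rewrite author's own statement) =====
-- stated objective: simpler
-- what changed: A builds, for every position, a bounded window by scanning up to 5 characters forward and 5 backward; B instead makes one left-to-right pass that collects each maximal run of allowed characters as a token and checks it against the accepted-word set when the run ends.
import Mathlib
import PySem

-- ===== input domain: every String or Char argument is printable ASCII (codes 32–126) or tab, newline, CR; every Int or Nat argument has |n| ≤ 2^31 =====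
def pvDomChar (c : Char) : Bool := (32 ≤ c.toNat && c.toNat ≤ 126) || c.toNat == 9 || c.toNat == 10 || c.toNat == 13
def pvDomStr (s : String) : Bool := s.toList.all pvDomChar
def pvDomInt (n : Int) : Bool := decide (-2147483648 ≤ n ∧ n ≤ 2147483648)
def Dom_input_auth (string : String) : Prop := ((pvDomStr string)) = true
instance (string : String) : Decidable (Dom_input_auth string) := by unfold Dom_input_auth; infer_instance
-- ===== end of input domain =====

-- B replaces A's per-position bounded-window scan by a single left-to-right tokenizing pass
-- (collect each maximal run of allowed characters, check it against the accepted words); objective: simpler.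

-- ===== PORT A =====
def acceptedA : List (List Char) :=
  [['x'], ['e'], ['p','i'], ['P','I'], ['s','q','r','t'], ['c','o','s'], ['s','i','n'],
   ['t','a','n'], ['a','r','c','c','o','s'], ['a','r','c','s','i','n'], ['a','r','c','t','a','n']]

def charactersA : List Char :=
  ['a', 'b', 'b', 'c', 'd', 'e', 'f', 'g', 'h', 'i', 'j', 'k', 'l', 'm', 'n', 'o', 'p',
   'q', 'r', 's', 't', 'u', 'v', 'w', 'x', 'y', 'z', 'A', 'B', 'C', 'D', 'E', 'F', 'G',
   'H', 'I', 'J', 'K', 'L', 'M', 'N', 'O', 'P', 'Q', 'R', 'S', 'T', 'U', 'V', 'W', 'X',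
   'Y', 'Z', '_', '#', '&']

def isCh (c : Char) : Bool := charactersA.contains c

-- the inner 'for j in range(1, 6)' forward loop: appends string[i+j] while allowed;
-- 'j <= len(string)-i' failing is a plain no-op iteration, string[i+j] with i+j = len raises (caught → break)
def fwdA (l : List Char) (i j : Nat) : List Char :=
  if 5 < j then []
  else if i + j ≤ l.length then
    if i + j < l.length then
      if isCh (l.getD (i + j) ' ') then l.getD (i + j) ' ' :: fwdA l i (j + 1) else []
    else []  -- string[i+j] raises IndexError, caught: break
  else fwdA l i (j + 1)
termination_by 6 - j

-- the backward 'for j in range(1, 6)' loop: prepends string[i-j] while j ≤ i and allowed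
def bwdA (l : List Char) (i j : Nat) : List Char :=
  if 5 < j then []
  else if j ≤ i then
    if isCh (l.getD (i - j) ' ') then bwdA l i (j + 1) ++ [l.getD (i - j) ' '] else []
  else []
termination_by 6 - j

def mainA (l : List Char) (i : Nat) : Bool :=
  if i < l.length then
    let cw : List Char :=
      if isCh (l.getD i ' ') then bwdA l i 1 ++ l.getD i ' ' :: fwdA l i 1 else []
    if !(acceptedA.contains cw) && !(cw == ([] : List Char)) then false
    else mainA l (i + 1)
  else true
termination_by l.length - i

def input_auth (string : String) : Bool := mainA string.toList 0

-- ===== PORT B =====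
def acceptedB : PySem.Set (List Char) :=
  PySem.Set.ofList
    [['x'], ['e'], ['p','i'], ['P','I'], ['s','q','r','t'], ['c','o','s'], ['s','i','n'],
     ['t','a','n'], ['a','r','c','c','o','s'], ['a','r','c','s','i','n'], ['a','r','c','t','a','n']]

def allowedB : PySem.Set Char :=
  PySem.Set.ofList
    ['a','b','c','d','e','f','g','h','i','j','k','l','m','n','o','p','q','r','s','t','u',
     'v','w','x','y','z','A','B','C','D','E','F','G','H','I','J','K','L','M','N','O','P',
     'Q','R','S','T','U','V','W','X','Y','Z','_','#','&']

-- Source B's single loop: grow the current run 'token', validate it whenever a non-allowed char ends it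
def altLoop (l : List Char) (token : List Char) : Bool :=
  match l with
  | [] => token == ([] : List Char) || PySem.Set.contains acceptedB token
  | c :: t =>
    if PySem.Set.contains allowedB c then altLoop t (token ++ [c])
    else if token != ([] : List Char) && !(PySem.Set.contains acceptedB token) then false
    else altLoop t []

def input_auth_alt (string : String) : Bool := altLoop string.toList []

-- ===== PRECONDITION & SPEC =====
def Spec_input_auth (string : String) (out : Bool) : Prop := out = input_auth_alt string
instance (string : String) (out : Bool) : Decidable (Spec_input_auth string out) := by unfold Spec_input_auth; infer_instance

-- ===== CLAIM (what is proved, stated in full; the proofs are below) =====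
def Claim_equal_input_auth : Prop := ∀ (string : String), Dom_input_auth string → Spec_input_auth string (input_auth string)

-- ===== LEMMAS AND PROOFS =====

-- proof-side helpers
def tokenize (l : List Char) : List (List Char) :=
  match l with
  | [] => []
  | c :: t =>
    if isCh c then (c :: t.takeWhile isCh) :: tokenize (t.dropWhile isCh)
    else tokenize t
termination_by l.length
decreasing_by
  · have := List.length_dropWhile_le isCh t; simp; omega
  · simp

-- the checkword A builds at a character position i, in closed form
def cwd (l : List Char) (i : Nat) : List Char :=
  (((l.take i).reverse.takeWhile isCh).take 5).reverse ++
    l.getD i ' ' :: ((l.drop (i + 1)).takeWhile isCh).take 5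

def okB (l : List Char) (i : Nat) : Bool :=
  if isCh (l.getD i ' ') then acceptedA.contains (cwd l i) else true

lemma fwdA_eq_aux (l : List Char) (i : Nat) :
    ∀ n j, j + n = 6 → fwdA l i j = ((l.drop (i + j)).takeWhile isCh).take (6 - j) := by
  intro n
  induction n with
  | zero =>
    intro j hj
    rw [fwdA]
    simp [show 5 < j by omega, show 6 - j = 0 by omega]
  | succ m ih =>
    intro j hj
    rw [fwdA]
    rw [if_neg (by omega : ¬ 5 < j)]
    by_cases hle : i + j ≤ l.length
    · rw [if_pos hle]
      by_cases hlt : i + j < l.length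
      · rw [if_pos hlt]
        rw [List.getD_eq_getElem l ' ' hlt]
        rw [List.drop_eq_getElem_cons hlt, List.takeWhile_cons]
        by_cases hch : isCh l[i + j] = true
        · rw [if_pos hch, hch, if_pos rfl, ih (j + 1) (by omega)]
          rw [show i + (j + 1) = i + j + 1 by omega, show 6 - j = (6 - (j + 1)) + 1 by omega]
          simp
        · rw [if_neg hch, eq_false_of_ne_true hch]
          simp [show 6 - j = (6 - (j+1)) + 1 by omega]
      · rw [if_neg hlt]
        rw [List.drop_eq_nil_of_le (by omega)]
        simp
    · rw [if_neg hle, ih (j + 1) (by omega)]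
      rw [List.drop_eq_nil_of_le (by omega), List.drop_eq_nil_of_le (by omega)]
      simp

lemma fwdA_eq (l : List Char) (i : Nat) :
    ∀ j, j ≤ 6 → fwdA l i j = ((l.drop (i + j)).takeWhile isCh).take (6 - j) := by
  intro j hj
  exact fwdA_eq_aux l i (6 - j) j (by omega)

lemma bwdA_eq_aux (l : List Char) (i : Nat) (hi : i ≤ l.length) :
    ∀ n j, 1 ≤ j → j + n = 6 →
      bwdA l i j = ((((l.take i).reverse.drop (j - 1)).takeWhile isCh).take (6 - j)).reverse := by
  have ht : (l.take i).reverse.length = i := by simp [hi]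
  intro n
  induction n with
  | zero =>
    intro j h1 hj
    rw [bwdA]
    simp [show 5 < j by omega, show 6 - j = 0 by omega]
  | succ m ih =>
    intro j h1 hj
    rw [bwdA]
    rw [if_neg (by omega : ¬ 5 < j)]
    by_cases hji : j ≤ i
    · rw [if_pos hji]
      have hdlt : j - 1 < (l.take i).reverse.length := by omega
      have hij : i - j < l.length := by omega
      have hgt : (l.take i).reverse[j-1]'hdlt = l[i - j]'hij := by
        rw [List.getElem_reverse]
        rw [List.getElem_take]
        congr 1
        simp only [List.length_take]
        omega
      have hdrop : (l.take i).reverse.drop (j - 1)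
          = l[i - j]'hij :: (l.take i).reverse.drop j := by
        rw [List.drop_eq_getElem_cons hdlt, hgt, show j - 1 + 1 = j by omega]
      rw [List.getD_eq_getElem l ' ' hij]
      rw [hdrop, List.takeWhile_cons]
      by_cases hch : isCh (l[i - j]'hij) = true
      · rw [if_pos hch, hch, if_pos rfl, ih (j + 1) (by omega) (by omega)]
        rw [show j + 1 - 1 = j by omega, show 6 - j = (6 - (j + 1)) + 1 by omega]
        simp
      · rw [if_neg hch, eq_false_of_ne_true hch]
        simp
    · rw [if_neg hji]
      rw [List.drop_eq_nil_of_le (by omega)]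
      simp

lemma bwdA_eq (l : List Char) (i : Nat) (hi : i ≤ l.length) :
    ∀ j, 1 ≤ j → j ≤ 6 →
      bwdA l i j = ((((l.take i).reverse.drop (j - 1)).takeWhile isCh).take (6 - j)).reverse := by
  intro j h1 h6
  exact bwdA_eq_aux l i hi (6 - j) j h1 (by omega)

lemma cwd_eq (l : List Char) (i : Nat) (hi : i < l.length) :
    bwdA l i 1 ++ l.getD i ' ' :: fwdA l i 1 = cwd l i := by
  rw [fwdA_eq l i 1 (by omega), bwdA_eq l i (by omega) 1 (le_refl 1) (by omega)]
  simp [cwd]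

lemma mainA_iff_aux (l : List Char) :
    ∀ n i, l.length ≤ i + n →
      (mainA l i = true ↔ ∀ k, i ≤ k → k < l.length → okB l k = true) := by
  intro n
  induction n with
  | zero =>
    intro i hn
    rw [mainA, if_neg (by omega : ¬ i < l.length)]
    constructor
    · intro _ k hk hkl; omega
    · intro _; rfl
  | succ m ih =>
    intro i hn
    by_cases hi : i < l.length
    · rw [mainA, if_pos hi]
      by_cases hch : isCh (l.getD i ' ') = true
      · have hok : okB l i = acceptedA.contains (cwd l i) := by
          rw [okB, if_pos hch]
        rw [if_pos hch, cwd_eq l i hi]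
        show (if (!acceptedA.contains (cwd l i) && !(cwd l i == ([] : List Char))) = true
              then false else mainA l (i + 1)) = true ↔ _
        by_cases hacc : acceptedA.contains (cwd l i) = true
        · rw [hacc]
          simp only [Bool.not_true, Bool.false_and, Bool.false_eq_true, if_false]
          rw [ih (i + 1) (by omega)]
          constructor
          · intro h k hk hkl
            rcases Nat.eq_or_lt_of_le hk with rfl | hlt
            · rw [hok, hacc]
            · exact h k (by omega) hkl
          · intro h k hk hkl; exact h k (by omega) hkl
        · have hne : (cwd l i == ([] : List Char)) = false := by
            rw [cwd]
            simp
          rw [eq_false_of_ne_true hacc, hne]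
          simp only [Bool.not_false, Bool.true_and, if_true]
          constructor
          · intro h; exact absurd h (by simp)
          · intro h
            have := h i (le_refl i) hi
            rw [hok] at this
            exact absurd this hacc
      · have hok : okB l i = true := by
          rw [okB, if_neg hch]
        rw [if_neg hch]
        show (if (!acceptedA.contains ([] : List Char) && !(([] : List Char) == ([] : List Char))) = true
              then false else mainA l (i + 1)) = true ↔ _
        simp only [beq_self_eq_true, Bool.not_true, Bool.and_false, Bool.false_eq_true, if_false]
        rw [ih (i + 1) (by omega)]
        constructor
        · intro h k hk hkl
          rcases Nat.eq_or_lt_of_le hk with rfl | hlt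
          · exact hok
          · exact h k (by omega) hkl
        · intro h k hk hkl; exact h k (by omega) hkl
    · rw [mainA, if_neg hi]
      constructor
      · intro _ k hk hkl; omega
      · intro _; rfl

lemma mainA_iff (l : List Char) :
    ∀ i, (mainA l i = true ↔ ∀ k, i ≤ k → k < l.length → okB l k = true) := by
  intro i
  exact mainA_iff_aux l l.length i (by omega)

-- takeWhile over appends
lemma tw_break (p : Char → Bool) (c : Char) (hc : p c = false) :
    ∀ xs ys : List Char, (xs ++ c :: ys).takeWhile p = xs.takeWhile p := by
  intro xs ys
  induction xs with
  | nil => simp [hc]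
  | cons a xs ih =>
    simp only [List.cons_append, List.takeWhile_cons]
    rw [ih]

lemma tw_stop (p : Char → Bool) :
    ∀ xs ys : List Char, (∃ x ∈ xs, p x = false) → (xs ++ ys).takeWhile p = xs.takeWhile p := by
  intro xs ys hx
  induction xs with
  | nil => rcases hx with ⟨x, hmem, _⟩; cases hmem
  | cons a xs ih =>
    by_cases ha : p a = true
    · simp only [List.cons_append, List.takeWhile_cons, ha, if_true]
      congr 1
      apply ih
      rcases hx with ⟨x, hmem, hpx⟩
      rcases List.mem_cons.1 hmem with rfl | hmem'
      · exact absurd ha (by simp [hpx])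
      · exact ⟨x, hmem', hpx⟩
    · simp only [List.cons_append, List.takeWhile_cons, eq_false_of_ne_true ha]
      simp

lemma tw_all (p : Char → Bool) :
    ∀ xs ys : List Char, (∀ x ∈ xs, p x = true) → (xs ++ ys).takeWhile p = xs ++ ys.takeWhile p := by
  intro xs ys hx
  induction xs with
  | nil => simp
  | cons a xs ih =>
    simp only [List.cons_append, List.takeWhile_cons, hx a (List.mem_cons_self), if_true]
    rw [ih (fun x hxm => hx x (List.mem_cons_of_mem a hxm))]

lemma dropWhile_head_false (p : Char → Bool) :
    ∀ (l : List Char) (a : Char) (t' : List Char), l.dropWhile p = a :: t' → p a = false := by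
  intro l
  induction l with
  | nil => intro a t' h; cases h
  | cons x xs ih =>
    intro a t' h
    rw [List.dropWhile_cons] at h
    by_cases hx : p x = true
    · rw [if_pos hx] at h; exact ih a t' h
    · rw [if_neg hx] at h
      cases h
      exact eq_false_of_ne_true hx

-- getD over appends
lemma getD_append_left (r rest : List Char) (k : Nat) (hk : k < r.length) :
    (r ++ rest).getD k ' ' = r.getD k ' ' := by
  rw [List.getD_eq_getElem?_getD, List.getD_eq_getElem?_getD, List.getElem?_append_left hk]

lemma getD_append_right (r rest : List Char) (p : Nat) :
    (r ++ rest).getD (r.length + p) ' ' = rest.getD p ' ' := by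
  rw [List.getD_eq_getElem?_getD, List.getD_eq_getElem?_getD,
    List.getElem?_append_right (by omega), show r.length + p - r.length = p by omega]

-- okB shifts
lemma cwd_cons (c : Char) (t : List Char) (hc : isCh c = false) (k : Nat) :
    cwd (c :: t) (k + 1) = cwd t k := by
  unfold cwd
  rw [List.drop_succ_cons, List.take_succ_cons, List.getD_cons_succ, List.reverse_cons,
    show ((t.take k).reverse ++ [c]) = ((t.take k).reverse ++ c :: []) from rfl,
    tw_break isCh c hc]

lemma okB_cons (c : Char) (t : List Char) (hc : isCh c = false) (k : Nat) :
    okB (c :: t) (k + 1) = okB t k := by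
  unfold okB
  rw [List.getD_cons_succ, cwd_cons c t hc k]

lemma cwd_append (r rest : List Char) (p : Nat)
    (hc0 : isCh (rest.getD 0 ' ') = false) (h1p : 1 ≤ p) (hp : p < rest.length) :
    cwd (r ++ rest) (r.length + p) = cwd rest p := by
  unfold cwd
  have hgd : (r ++ rest).getD (r.length + p) ' ' = rest.getD p ' ' := getD_append_right r rest p
  have hdrop : (r ++ rest).drop (r.length + p + 1) = rest.drop (p + 1) := by
    rw [List.drop_append, List.drop_eq_nil_of_le (by omega : r.length ≤ r.length + p + 1)]
    simp only [List.nil_append]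
    congr 1
    omega
  have htake : (r ++ rest).take (r.length + p) = r ++ rest.take p := by
    rw [List.take_append, List.take_of_length_le (by omega : r.length ≤ r.length + p)]
    congr 2
    omega
  rw [hgd, hdrop, htake, List.reverse_append]
  have hmem : ∃ x ∈ (rest.take p).reverse, isCh x = false := by
    refine ⟨rest.getD 0 ' ', ?_, ?_⟩
    · rw [List.mem_reverse]
      have h0 : (rest.take p)[0]'(by simp; omega) = rest[0]'(by omega) := List.getElem_take
      rw [List.getD_eq_getElem (d := ' ') rest (by omega : 0 < rest.length), ← h0]
      exact List.getElem_mem _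
    · exact hc0
  rw [tw_stop isCh _ _ hmem]

lemma okB_append (r rest : List Char) (p : Nat)
    (hc0 : isCh (rest.getD 0 ' ') = false) (h1p : 1 ≤ p) (hp : p < rest.length) :
    okB (r ++ rest) (r.length + p) = okB rest p := by
  unfold okB
  rw [getD_append_right r rest p, cwd_append r rest p hc0 h1p hp]

-- the checkword at a position inside a fully-allowed run r followed by rest (empty or non-allowed head)
lemma cwd_run (r rest : List Char) (hr : ∀ x ∈ r, isCh x = true)
    (hrest : rest = [] ∨ isCh (rest.getD 0 ' ') = false) (i : Nat) (hi : i < r.length) :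
    cwd (r ++ rest) i =
      ((r.take i).reverse.take 5).reverse ++ r.getD i ' ' :: (r.drop (i + 1)).take 5 := by
  unfold cwd
  have hgd : (r ++ rest).getD i ' ' = r.getD i ' ' := getD_append_left r rest i hi
  have htake : (r ++ rest).take i = r.take i := by
    rw [List.take_append, show i - r.length = 0 by omega]
    simp
  have hdrop : (r ++ rest).drop (i + 1) = r.drop (i + 1) ++ rest := by
    rw [List.drop_append, show i + 1 - r.length = 0 by omega, List.drop_zero]
  have htwb : ((r.take i).reverse).takeWhile isCh = (r.take i).reverse := by
    rw [List.takeWhile_eq_self_iff]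
    intro x hx
    exact hr x (List.mem_of_mem_take (List.mem_reverse.1 hx))
  have htwf : (r.drop (i + 1) ++ rest).takeWhile isCh = r.drop (i + 1) := by
    rw [tw_all isCh _ _ (fun x hx => hr x (List.mem_of_mem_drop hx))]
    have : rest.takeWhile isCh = [] := by
      rcases hrest with rfl | hh
      · rfl
      · cases hre : rest with
        | nil => rfl
        | cons d t' =>
          rw [hre] at hh
          simp only [List.takeWhile_cons]
          rw [if_neg (by simpa using hh)]
    rw [this, List.append_nil]
  rw [hgd, htake, hdrop, htwb, htwf]

lemma cwd_run_small (r rest : List Char) (hr : ∀ x ∈ r, isCh x = true)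
    (hrest : rest = [] ∨ isCh (rest.getD 0 ' ') = false) (hlen : r.length ≤ 6)
    (i : Nat) (hi : i < r.length) :
    cwd (r ++ rest) i = r := by
  rw [cwd_run r rest hr hrest i hi]
  have h1 : ((r.take i).reverse).take 5 = (r.take i).reverse :=
    List.take_of_length_le (by rw [List.length_reverse, List.length_take]; omega)
  have h2 : (r.drop (i + 1)).take 5 = r.drop (i + 1) :=
    List.take_of_length_le (by rw [List.length_drop]; omega)
  rw [h1, List.reverse_reverse, h2, List.getD_eq_getElem (d := ' ') r hi,
    ← List.drop_eq_getElem_cons hi, List.take_append_drop]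

lemma cwd_run_big (r rest : List Char) (hr : ∀ x ∈ r, isCh x = true)
    (hrest : rest = [] ∨ isCh (rest.getD 0 ' ') = false) (hlen : 7 ≤ r.length) :
    (cwd (r ++ rest) 1).length = 7 := by
  rw [cwd_run r rest hr hrest 1 (by omega)]
  simp [List.length_take, List.length_reverse]
  omega

lemma accepted_len : ∀ w ∈ acceptedA, w.length ≤ 6 := by decide

lemma accepted_not7 (w : List Char) (hw : w.length = 7) : acceptedA.contains w = false := by
  by_contra h
  have : acceptedA.contains w = true := by
    cases hcc : acceptedA.contains w with
    | true => rfl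
    | false => exact absurd hcc h
  have hmem : w ∈ acceptedA := List.contains_iff_mem.1 this
  have := accepted_len w hmem
  omega

lemma tokenize_cons_neg (c : Char) (t : List Char) (hc : isCh c = false) :
    tokenize (c :: t) = tokenize t := by
  rw [tokenize]
  simp [hc]

lemma tokenize_cons_pos (c : Char) (t : List Char) (hc : isCh c = true) :
    tokenize (c :: t) = (c :: t.takeWhile isCh) :: tokenize (t.dropWhile isCh) := by
  rw [tokenize]
  simp [hc]

lemma okB_nonchar (l : List Char) (i : Nat) (h : isCh (l.getD i ' ') = false) :
    okB l i = true := by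
  unfold okB
  rw [h]
  rfl

lemma okB_char (l : List Char) (i : Nat) (h : isCh (l.getD i ' ') = true) :
    okB l i = acceptedA.contains (cwd l i) := by
  unfold okB
  rw [h]
  rfl

lemma main_equiv_aux :
    ∀ n (l : List Char), l.length ≤ n →
      ((∀ k, k < l.length → okB l k = true) ↔ (∀ tok ∈ tokenize l, tok ∈ acceptedA)) := by
  intro n
  induction n with
  | zero =>
    intro l hl
    have : l = [] := List.eq_nil_of_length_eq_zero (by omega)
    subst this
    simp [tokenize]
  | succ m ih =>
    intro l hl
    cases l with
    | nil => simp [tokenize]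
    | cons c t =>
      by_cases hc : isCh c = true
      · -- allowed head: the maximal run r, then rest
        have hsplit : c :: t = (c :: t.takeWhile isCh) ++ t.dropWhile isCh := by
          simp [List.takeWhile_append_dropWhile]
        set r : List Char := c :: t.takeWhile isCh with hr_def
        set rest : List Char := t.dropWhile isCh with hrest_def
        have hr : ∀ x ∈ r, isCh x = true := by
          intro x hx
          rcases List.mem_cons.1 hx with rfl | hx'
          · exact hc
          · exact List.mem_takeWhile_imp hx'
        have hrest : rest = [] ∨ isCh (rest.getD 0 ' ') = false := by
          cases hre : rest with
          | nil => exact Or.inl rfl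
          | cons d t' =>
            right
            have hdw : t.dropWhile isCh = d :: t' := hrest_def.symm.trans hre
            exact dropWhile_head_false isCh t d t' hdw
        have hrlen1 : 1 ≤ r.length := by simp [hr_def]
        have hlength : (c :: t).length = r.length + rest.length := by
          rw [hsplit, List.length_append]
        have hrestlen : rest.length ≤ t.length := List.length_dropWhile_le _ _
        rw [tokenize_cons_pos c t hc, ← hr_def, ← hrest_def, List.forall_mem_cons]
        rw [show (c :: t) = r ++ rest from hsplit]
        by_cases hbig : 7 ≤ r.length
        · constructor
          · intro h
            exfalso
            have h1 : okB (r ++ rest) 1 = true := h 1 (by simp; omega)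
            have hch1 : isCh ((r ++ rest).getD 1 ' ') = true := by
              rw [getD_append_left r rest 1 (by omega), List.getD_eq_getElem (d := ' ') r (by omega)]
              exact hr _ (List.getElem_mem _)
            rw [okB_char _ _ hch1, accepted_not7 _ (cwd_run_big r rest hr hrest hbig)] at h1
            exact Bool.false_ne_true h1
          · intro h
            exfalso
            have := accepted_len r h.1
            omega
        · have hsmall : r.length ≤ 6 := by omega
          have hcwd : ∀ i, i < r.length → cwd (r ++ rest) i = r :=
            fun i hi => cwd_run_small r rest hr hrest hsmall i hi
          have hch : ∀ i, (hi : i < r.length) → isCh ((r ++ rest).getD i ' ') = true := by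
            intro i hi
            rw [getD_append_left r rest i hi, List.getD_eq_getElem (d := ' ') r hi]
            exact hr _ (List.getElem_mem _)
          constructor
          · intro h
            refine ⟨?_, ?_⟩
            · have h0 := h 0 (by simp; omega)
              rw [okB_char _ _ (hch 0 (by omega)), hcwd 0 (by omega)] at h0
              exact List.contains_iff_mem.1 h0
            · refine (ih rest (by omega)).1 ?_
              intro p hp
              rcases Nat.eq_zero_or_pos p with rfl | h1p
              · rcases hrest with hnil | hh
                · rw [hnil] at hp; simp at hp
                · exact okB_nonchar rest 0 hh
              · rcases hrest with hnil | hh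
                · rw [hnil] at hp; simp at hp
                · rw [← okB_append r rest p hh h1p hp]
                  exact h (r.length + p) (by rw [List.length_append]; omega)
          · rintro ⟨hacc, htoks⟩ k hk
            rw [List.length_append] at hk
            by_cases hkr : k < r.length
            · rw [okB_char _ _ (hch k hkr), hcwd k hkr]
              exact List.contains_iff_mem.2 hacc
            · have hp : k - r.length < rest.length := by omega
              have hkeq : k = r.length + (k - r.length) := by omega
              rcases hrest with hnil | hh
              · rw [hnil] at hp; simp at hp
              · rcases Nat.eq_zero_or_pos (k - r.length) with hz | h1p
                · rw [hkeq, hz]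
                  apply okB_nonchar
                  rw [getD_append_right r rest 0]
                  exact hh
                · rw [hkeq, okB_append r rest _ hh h1p hp]
                  exact (ih rest (by omega)).2 htoks _ hp
      · have hc' : isCh c = false := eq_false_of_ne_true hc
        rw [tokenize_cons_neg c t hc']
        rw [← ih t (by simp at hl; omega)]
        constructor
        · intro h k hk
          rw [← okB_cons c t hc' k]
          exact h (k + 1) (by simp; omega)
        · intro h k hk
          cases k with
          | zero => exact okB_nonchar _ 0 (by rw [List.getD_cons_zero]; exact hc')
          | succ k' =>
            rw [okB_cons c t hc' k']
            exact h k' (by simp at hk; omega)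

lemma main_equiv (l : List Char) :
    (∀ k, k < l.length → okB l k = true) ↔ (∀ tok ∈ tokenize l, tok ∈ acceptedA) :=
  main_equiv_aux l.length l (le_refl _)

set_option maxRecDepth 8000 in
lemma allowed_isCh (c : Char) : PySem.Set.contains allowedB c = isCh c := by
  have hB : (allowedB : List Char) =
      ['a','b','c','d','e','f','g','h','i','j','k','l','m','n','o','p','q','r','s','t','u',
       'v','w','x','y','z','A','B','C','D','E','F','G','H','I','J','K','L','M','N','O','P',
       'Q','R','S','T','U','V','W','X','Y','Z','_','#','&'] := by decide
  rw [isCh]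
  simp only [PySem.Set.contains_eq_listContains]
  rw [hB, charactersA]
  by_cases hb : c = 'b' <;> simp [hb]

set_option maxRecDepth 8000 in
lemma acceptedB_contains (w : List Char) :
    PySem.Set.contains acceptedB w = acceptedA.contains w := by
  have hB : (acceptedB : List (List Char)) = acceptedA := by decide
  simp only [PySem.Set.contains_eq_listContains]
  rw [hB]

lemma altLoop_run :
    ∀ (m rest tok : List Char), (∀ x ∈ m, isCh x = true) →
      altLoop (m ++ rest) tok = altLoop rest (tok ++ m) := by
  intro m
  induction m with
  | nil => intro rest tok _; simp
  | cons a m' ih =>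
    intro rest tok hm
    rw [List.cons_append, altLoop, allowed_isCh a,
      if_pos (hm a (List.mem_cons_self)), ih rest (tok ++ [a])
        (fun x hx => hm x (List.mem_cons_of_mem a hx))]
    congr 1
    simp

lemma alt_iff_aux :
    ∀ n (l : List Char), l.length ≤ n →
      (altLoop l [] = true ↔ ∀ tok ∈ tokenize l, tok ∈ acceptedA) := by
  intro n
  induction n with
  | zero =>
    intro l hl
    have : l = [] := List.eq_nil_of_length_eq_zero (by omega)
    subst this
    simp [altLoop, tokenize]
  | succ m ih =>
    intro l hl
    cases l with
    | nil => simp [altLoop, tokenize]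
    | cons c t =>
      by_cases hc : isCh c = true
      · rw [tokenize_cons_pos c t hc, List.forall_mem_cons]
        rw [altLoop, allowed_isCh c, if_pos hc, List.nil_append]
        have hsplit : t = t.takeWhile isCh ++ t.dropWhile isCh :=
          (List.takeWhile_append_dropWhile).symm
        rw [show altLoop t [c] = altLoop (t.takeWhile isCh ++ t.dropWhile isCh) [c] by
              rw [← hsplit]]
        rw [altLoop_run (t.takeWhile isCh) (t.dropWhile isCh) [c]
              (fun x hx => List.mem_takeWhile_imp hx)]
        have hrestlen : (t.dropWhile isCh).length ≤ t.length := List.length_dropWhile_le _ _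
        have hracc : ([c] ++ t.takeWhile isCh : List Char) = c :: t.takeWhile isCh := rfl
        rw [hracc]
        cases hre : t.dropWhile isCh with
        | nil =>
          rw [altLoop]
          have hne : ((c :: t.takeWhile isCh : List Char) == ([] : List Char)) = false := by
            simp
          rw [hne, acceptedB_contains, Bool.false_or, tokenize]
          simp
        | cons d t' =>
          have hd : isCh d = false := dropWhile_head_false isCh t d t' hre
          rw [altLoop, allowed_isCh d, if_neg (by simp [hd])]
          have hne : ((c :: t.takeWhile isCh : List Char) != ([] : List Char)) = true := by
            simp
          rw [hne, acceptedB_contains, Bool.true_and, tokenize_cons_neg d t' hd]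
          by_cases hacc : acceptedA.contains (c :: t.takeWhile isCh) = true
          · rw [hacc]
            simp only [Bool.not_true, Bool.false_eq_true, if_false]
            rw [ih t' (by
              have h2 : (d :: t').length ≤ t.length := hre ▸ hrestlen
              simp at h2 hl
              omega)]
            have hmem : c :: t.takeWhile isCh ∈ acceptedA := List.contains_iff_mem.1 hacc
            constructor
            · intro h; exact ⟨hmem, h⟩
            · intro h; exact h.2
          · rw [eq_false_of_ne_true hacc]
            simp only [Bool.not_false, if_true]
            constructor
            · intro h; exact absurd h (by simp)
            · intro h
              exact absurd (List.contains_iff_mem.2 h.1) hacc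
      · have hc' : isCh c = false := eq_false_of_ne_true hc
        rw [tokenize_cons_neg c t hc']
        rw [altLoop, allowed_isCh c, if_neg (by simp [hc'])]
        have : (([] : List Char) != ([] : List Char)) = false := by simp
        rw [this, Bool.false_and]
        simp only [Bool.false_eq_true, if_false]
        exact ih t (by simp at hl; omega)

lemma alt_iff (l : List Char) :
    (altLoop l [] = true ↔ ∀ tok ∈ tokenize l, tok ∈ acceptedA) :=
  alt_iff_aux l.length l (le_refl _)

-- ===== VERDICT (by name: the statement is the Claim_ definition above) =====
theorem input_auth_spec : Claim_equal_input_auth := by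
  intro s _
  unfold Spec_input_auth input_auth input_auth_alt
  rw [Bool.eq_iff_iff, mainA_iff s.toList 0, alt_iff s.toList]
  constructor
  · intro h; exact (main_equiv s.toList).1 (fun k hk => h k (Nat.zero_le _) hk)
  · intro h; exact fun k _ hk => (main_equiv s.toList).2 h k hk
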